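-- pv_equiv track=rewrite | github.com/puja2504/cv-programs | forward and backward.py | check
-- ===== SOURCE A (Python) =====
-- def check(knowns,facts):
--     R=[]
--     for known in knowns:
--         for A,B in facts:
--             if known==B and (A,B) not in R:
--                 R.append((A,B))
--                 knowns.append(A)
--     return R
-- ===== SOURCE B (Python) =====
-- def check(knowns, facts):
--     # Two-phase re-implementation: (1) compute the BFS closure of reachable
--     # knowns (each distinct known processed once, via a bucket index of
--     # deduplicated antecedents per consequent), (2) emit R afterwards by a
--     # single comprehension over that order.  Return value only (A also
--     # appends derived antecedents to `knowns` in place; B does not).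
--     bucket = {}
--     seen_pairs = set()
--     for a, b in facts:
--         if (a, b) not in seen_pairs:
--             seen_pairs.add((a, b))
--             bucket.setdefault(b, []).append(a)
--     order = []
--     known_set = set()
--     for k in knowns:
--         if k not in known_set:
--             known_set.add(k)
--             order.append(k)
--     j = 0
--     while j < len(order):
--         for a in bucket.get(order[j], []):
--             if a not in known_set:
--                 known_set.add(a)
--                 order.append(a)
--         j += 1
--     return [(a, k) for k in order for a in bucket.get(k, [])]
-- ===== Notes on version B (the rewrite author's own statement) =====
-- stated objective: faster
-- what changed: B is a two-phase algorithm: it first computes the BFS closure of reachable knowns (each distinct known processed once against a prebuilt, deduplicated consequent-indexed bucket), then emits R afterwards by a single comprehension over that order, instead of A's single interleaved loop that rescans all facts and the whole R list for every (possibly duplicate) agenda entry.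
import Mathlib
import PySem

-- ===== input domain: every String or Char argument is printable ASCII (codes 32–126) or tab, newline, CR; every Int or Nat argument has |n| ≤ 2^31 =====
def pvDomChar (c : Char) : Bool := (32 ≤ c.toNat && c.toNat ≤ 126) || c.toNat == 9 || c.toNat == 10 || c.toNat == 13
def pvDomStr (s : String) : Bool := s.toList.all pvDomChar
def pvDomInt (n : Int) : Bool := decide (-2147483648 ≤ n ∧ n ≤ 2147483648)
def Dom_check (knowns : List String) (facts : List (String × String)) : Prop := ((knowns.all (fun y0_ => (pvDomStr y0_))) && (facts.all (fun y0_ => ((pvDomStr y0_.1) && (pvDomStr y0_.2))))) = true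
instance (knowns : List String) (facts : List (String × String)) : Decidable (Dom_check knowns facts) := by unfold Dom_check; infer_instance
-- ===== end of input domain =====

-- B re-implements forward chaining in two phases — (1) BFS closure of reachable knowns over a
-- deduplicated consequent-indexed bucket, (2) emit R afterwards by one comprehension — instead of
-- A's interleaved agenda/emission loop; equivalence is about the RETURN value (A also appends to
-- `knowns` in place; B does not mutate it).


-- ===== PORT A =====
-- `for known in knowns` with `knowns.append` inside iterates by index over the
-- growing list; fuel = knowns.length + facts.length + 1 bounds the iterations
-- (each R-append adds one element to knowns and R holds distinct facts).
def checkLoopA (facts : List (String × String)) :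
    Nat → Nat → List String → List (String × String) → List (String × String)
  | 0, _, _, R => R
  | fuel+1, i, ks, R =>
    match ks[i]? with
    | none => R
    | some known =>
      let st := facts.foldl (fun (st : List String × List (String × String)) p =>
        if known = p.2 ∧ p ∉ st.2 then (st.1 ++ [p.1], st.2 ++ [p]) else st) (ks, R)
      checkLoopA facts fuel (i+1) st.1 st.2

def check (knowns : List String) (facts : List (String × String)) : List (String × String) :=
  checkLoopA facts (knowns.length + facts.length + 1) 0 knowns []

-- ===== PORT B =====
-- phase 0: bucket.setdefault(b, []).append(a) behind a pair-dedup set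
def buildBucketB (facts : List (String × String)) :
    PySem.Set (String × String) × PySem.Dict String (List String) :=
  facts.foldl (fun st p =>
    if p ∈ st.1 then st else (st.1.add p, st.2.modify p.2 [] (· ++ [p.1])))
    (PySem.Set.empty, PySem.Dict.empty)

-- shared step of B's two agenda-building loops: append k if unseen
def addNew (st : List String × PySem.Set String) (k : String) : List String × PySem.Set String :=
  if k ∈ st.2 then st else (st.1 ++ [k], st.2.add k)

-- phase 1b: while j < len(order): enqueue unseen antecedents of order[j]
def closureLoopB (bucket : PySem.Dict String (List String)) :
    Nat → Nat → List String × PySem.Set String → List String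
  | 0, _, st => st.1
  | fuel+1, j, st =>
    match st.1[j]? with
    | none => st.1
    | some k => closureLoopB bucket fuel (j+1) ((bucket.getD k []).foldl addNew st)

def check_alt (knowns : List String) (facts : List (String × String)) : List (String × String) :=
  let bucket := (buildBucketB facts).2
  let order := closureLoopB bucket (knowns.length + facts.length + 1) 0
    (knowns.foldl addNew ([], PySem.Set.empty))
  order.flatMap (fun k => (bucket.getD k []).map (fun a => (a, k)))

-- ===== PRECONDITION & SPEC =====
def Spec_check (knowns : List String) (facts : List (String × String)) (out : List (String × String)) : Prop := out = check_alt knowns facts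
instance (knowns : List String) (facts : List (String × String)) (out : List (String × String)) : Decidable (Spec_check knowns facts out) := by unfold Spec_check; infer_instance

-- ===== CLAIM (what is proved, stated in full; the proofs are below) =====
def Claim_equal_check : Prop := ∀ (knowns : List String) (facts : List (String × String)), Dom_check knowns facts → Spec_check knowns facts (check knowns facts)

-- ===== LEMMAS AND PROOFS =====

-- abstract machine: plain-list versions of B's phases, the common ground between A and B
def ins (acc : List String) (x : String) : List String := if x ∈ acc then acc else acc ++ [x]

def dedupF (l : List String) : List String := l.foldl ins []

-- the new antecedents a fact scan for consequent k adds beyond acc (A's inner loop delta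
-- = B's bucket content for key k when acc = [])
def newOf : List (String × String) → String → List String → List String
  | [], _, _ => []
  | p :: fs, k, acc =>
    if p.2 = k ∧ p.1 ∉ acc then p.1 :: newOf fs k (acc ++ [p.1]) else newOf fs k acc

def Mloop (G : String → List String) : Nat → Nat → List String → List String
  | 0, _, ord => ord
  | fuel+1, j, ord =>
    match ord[j]? with
    | none => ord
    | some k => Mloop G fuel (j+1) ((G k).foldl ins ord)

def groupG (G : String → List String) (k : String) : List (String × String) :=
  (G k).map (fun a => (a, k))

-- ---- ins / dedupF facts ----
theorem foldl_ins_delta : ∀ (l acc : List String), ∃ t, l.foldl ins acc = acc ++ t := by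
  intro l
  induction l with
  | nil => intro acc; exact ⟨[], by simp⟩
  | cons x l ih =>
    intro acc
    simp only [List.foldl_cons, ins]
    split_ifs with h
    · exact ih acc
    · obtain ⟨t, ht⟩ := ih (acc ++ [x])
      exact ⟨[x] ++ t, by simp [ht]⟩

theorem mem_foldl_ins : ∀ (l acc : List String) (x : String),
    x ∈ l.foldl ins acc ↔ x ∈ acc ∨ x ∈ l := by
  intro l
  induction l with
  | nil => intro acc x; simp
  | cons y l ih =>
    intro acc x
    simp only [List.foldl_cons, ins]
    split_ifs with h
    · rw [ih]
      simp only [List.mem_cons]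
      constructor
      · rintro (hx | hx) <;> tauto
      · rintro (hx | hx | hx) <;> first | tauto | (subst hx; tauto)
    · rw [ih]
      simp only [List.mem_append, List.mem_cons]
      tauto

theorem nodup_foldl_ins : ∀ (l acc : List String), acc.Nodup → (l.foldl ins acc).Nodup := by
  intro l
  induction l with
  | nil => intro acc h; exact h
  | cons x l ih =>
    intro acc h
    simp only [List.foldl_cons, ins]
    split_ifs with hx
    · exact ih acc h
    · refine ih (acc ++ [x]) ?_
      rw [List.nodup_append]
      exact ⟨h, List.nodup_singleton x, by
        intro a ha b hb
        simp only [List.mem_singleton] at hb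
        subst hb
        exact fun e => hx (e ▸ ha)⟩

theorem length_foldl_ins_le : ∀ (l acc : List String),
    (l.foldl ins acc).length ≤ acc.length + l.length := by
  intro l
  induction l with
  | nil => intro acc; simp
  | cons x l ih =>
    intro acc
    simp only [List.foldl_cons, ins, List.length_cons]
    split_ifs with h
    · have := ih acc; omega
    · have := ih (acc ++ [x]); simp at this; omega

-- ---- newOf facts ----
theorem length_newOf_le : ∀ (fs : List (String × String)) (k : String) (acc : List String),
    (newOf fs k acc).length ≤ fs.countP (fun p => p.2 == k) := by
  intro fs
  induction fs with
  | nil => intro k acc; simp [newOf]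
  | cons p fs ih =>
    intro k acc
    have hcnt : (p :: fs).countP (fun p => p.2 == k)
        = fs.countP (fun p => p.2 == k) + (if p.2 = k then 1 else 0) := by
      rw [List.countP_cons]
      by_cases hk : p.2 = k <;> simp [hk]
    simp only [newOf]
    by_cases hpk : p.2 = k
    · rw [hcnt, if_pos hpk]
      by_cases hacc : p.1 ∈ acc
      · rw [if_neg (by tauto)]
        have := ih k acc; omega
      · rw [if_pos ⟨hpk, hacc⟩]
        have := ih k (acc ++ [p.1])
        simp only [List.length_cons]; omega
    · rw [hcnt, if_neg hpk, if_neg (by tauto)]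
      have := ih k acc; omega

theorem mem_newOf : ∀ (fs : List (String × String)) (k : String) (acc : List String) (a : String),
    (a, k) ∈ fs → a ∉ acc → a ∈ newOf fs k acc := by
  intro fs
  induction fs with
  | nil => intro k acc a h; simp at h
  | cons p fs ih =>
    intro k acc a hmem hacc
    simp only [List.mem_cons] at hmem
    simp only [newOf]
    rcases hmem with hp | hp
    · have h1 : p.2 = k := by rw [← hp]
      have h2 : p.1 = a := by rw [← hp]
      subst h2
      rw [if_pos ⟨h1, hacc⟩]
      exact List.mem_cons_self
    · split_ifs with h
      · by_cases hax : a = p.1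
        · subst hax; exact List.mem_cons_self
        · exact List.mem_cons_of_mem _ (ih k (acc ++ [p.1]) a hp (by simp [hacc, hax]))
      · exact ih k acc a hp hacc

theorem sum_ind_zero (x : String) : ∀ (K : List String), x ∉ K →
    (K.map (fun k => if x = k then (1:Nat) else 0)).sum = 0 := by
  intro K
  induction K with
  | nil => intro _; simp
  | cons k K ih =>
    intro hx
    simp only [List.mem_cons, not_or] at hx
    simp [hx.1, ih hx.2]

theorem sum_ind_le_one (x : String) : ∀ (K : List String), K.Nodup →
    (K.map (fun k => if x = k then (1:Nat) else 0)).sum ≤ 1 := by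
  intro K
  induction K with
  | nil => intro _; simp
  | cons k K ih =>
    intro h
    rw [List.nodup_cons] at h
    simp only [List.map_cons, List.sum_cons]
    by_cases hx : x = k
    · subst hx
      rw [sum_ind_zero x K h.1]
      simp
    · simp only [hx, if_false, Nat.zero_add]
      exact ih h.2

theorem sum_map_add (f g : String → Nat) : ∀ (K : List String),
    (K.map (fun k => f k + g k)).sum = (K.map f).sum + (K.map g).sum := by
  intro K
  induction K with
  | nil => simp
  | cons k K ih => simp [ih]; omega

theorem sum_countP_le : ∀ (fs : List (String × String)) (K : List String), K.Nodup →
    (K.map (fun k => fs.countP (fun p => p.2 == k))).sum ≤ fs.length := by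
  intro fs
  induction fs with
  | nil => intro K _; simp
  | cons p fs ih =>
    intro K hK
    have hstep : ∀ k : String, (p :: fs).countP (fun q => q.2 == k)
        = fs.countP (fun q => q.2 == k) + (if p.2 = k then 1 else 0) := by
      intro k
      rw [List.countP_cons]
      by_cases hk : p.2 = k <;> simp [hk]
    calc (K.map (fun k => (p :: fs).countP (fun q => q.2 == k))).sum
        = (K.map (fun k => fs.countP (fun q => q.2 == k) + (if p.2 = k then 1 else 0))).sum := by
          congr 1
          exact List.map_congr_left (fun k _ => hstep k)
      _ = (K.map (fun k => fs.countP (fun q => q.2 == k))).sum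
          + (K.map (fun k => if p.2 = k then 1 else 0)).sum := sum_map_add _ _ K
      _ ≤ fs.length + 1 :=
          Nat.add_le_add (ih K hK) (sum_ind_le_one p.2 K hK)
      _ = (p :: fs).length := by simp

-- total size of the groups over distinct consequents is at most the number of facts
theorem lenR_le (facts : List (String × String)) :
    ∀ (K : List String), K.Nodup →
    (K.flatMap (groupG (fun k => newOf facts k []))).length ≤ facts.length := by
  intro K hK
  rw [List.length_flatMap]
  have h1 : ∀ k ∈ K, (groupG (fun k => newOf facts k []) k).length
      ≤ facts.countP (fun p => p.2 == k) := by
    intro k _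
    simp only [groupG, List.length_map]
    exact length_newOf_le facts k []
  calc (K.map fun k => (groupG (fun k => newOf facts k []) k).length).sum
      ≤ (K.map fun k => facts.countP (fun p => p.2 == k)).sum := by
        apply List.sum_le_sum
        intro k hk
        exact h1 k (by simpa using hk)
    _ ≤ facts.length := sum_countP_le facts K hK

-- ---- A's inner fact scan ----
theorem innerA_noop (known : String) :
    ∀ (fs : List (String × String)) (ks : List String) (R : List (String × String)),
    (∀ p ∈ fs, p.2 = known → p ∈ R) →
    fs.foldl (fun (st : List String × List (String × String)) p =>
      if known = p.2 ∧ p ∉ st.2 then (st.1 ++ [p.1], st.2 ++ [p]) else st) (ks, R) = (ks, R) := by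
  intro fs
  induction fs with
  | nil => intro ks R _; rfl
  | cons p fs ih =>
    intro ks R h
    simp only [List.foldl_cons]
    have hcond : ¬ (known = p.2 ∧ p ∉ R) := by
      rintro ⟨h1, h2⟩
      exact h2 (h p List.mem_cons_self h1.symm)
    rw [if_neg hcond]
    exact ih ks R (fun q hq => h q (List.mem_cons_of_mem _ hq))

theorem innerA_new (known : String) :
    ∀ (fs : List (String × String)) (ks : List String) (R : List (String × String))
      (acc : List String),
    (∀ a, (a, known) ∈ R ↔ a ∈ acc) →
    fs.foldl (fun (st : List String × List (String × String)) p =>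
      if known = p.2 ∧ p ∉ st.2 then (st.1 ++ [p.1], st.2 ++ [p]) else st) (ks, R)
      = (ks ++ newOf fs known acc, R ++ (newOf fs known acc).map (fun a => (a, known))) := by
  intro fs
  induction fs with
  | nil => intro ks R acc _; simp [newOf]
  | cons p fs ih =>
    intro ks R acc h
    simp only [List.foldl_cons, newOf]
    by_cases hpk : p.2 = known
    · have hp : p = (p.1, known) := by rw [← hpk]
      by_cases hacc : p.1 ∈ acc
      · have hpR : p ∈ R := by rw [hp]; exact (h p.1).2 hacc
        rw [if_neg (by rintro ⟨_, h2⟩; exact h2 hpR), if_neg (by rintro ⟨_, h2⟩; exact h2 hacc)]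
        exact ih ks R acc h
      · have hpR : p ∉ R := by rw [hp]; intro hc; exact hacc ((h p.1).1 hc)
        rw [if_pos ⟨hpk.symm, hpR⟩, if_pos ⟨hpk, hacc⟩]
        have h' : ∀ a, (a, known) ∈ R ++ [p] ↔ a ∈ acc ++ [p.1] := by
          intro a
          rw [hp]
          simp only [List.mem_append, List.mem_singleton, Prod.mk.injEq]
          constructor
          · rintro (ha | ⟨ha, _⟩)
            · exact Or.inl ((h a).1 ha)
            · exact Or.inr ha
          · rintro (ha | ha)
            · exact Or.inl ((h a).2 ha)
            · exact Or.inr ⟨ha, trivial⟩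
        rw [ih (ks ++ [p.1]) (R ++ [p]) (acc ++ [p.1]) h', hp]
        simp [List.append_assoc]
    · rw [if_neg (by rintro ⟨h1, _⟩; exact hpk h1.symm),
          if_neg (by rintro ⟨h1, _⟩; exact hpk h1)]
      exact ih ks R acc h

-- ---- B's bucket equals newOf ----
theorem bucketB_getD : ∀ (fs : List (String × String)) (seen : PySem.Set (String × String))
    (d : PySem.Dict String (List String)),
    (∀ a b, ((a, b) ∈ seen ↔ a ∈ d.getD b [])) → ∀ k,
    ((fs.foldl (fun st p =>
        if p ∈ st.1 then st else (st.1.add p, st.2.modify p.2 [] (· ++ [p.1]))) (seen, d)).2.getD k [])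
      = d.getD k [] ++ newOf fs k (d.getD k []) := by
  intro fs
  induction fs with
  | nil => intro seen d _ k; simp [newOf]
  | cons p fs ih =>
    intro seen d hinv k
    simp only [List.foldl_cons]
    by_cases hp : p ∈ seen
    · rw [if_pos hp]
      have hpd : p.1 ∈ d.getD p.2 [] := (hinv p.1 p.2).1 hp
      have hnew : newOf (p :: fs) k (d.getD k []) = newOf fs k (d.getD k []) := by
        simp only [newOf]
        by_cases hpk : p.2 = k
        · rw [if_neg (by rintro ⟨_, h2⟩; exact h2 (hpk ▸ hpd))]
        · rw [if_neg (by rintro ⟨h1, _⟩; exact hpk h1)]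
      rw [hnew]
      exact ih seen d hinv k
    · rw [if_neg hp]
      have hinv' : ∀ a b, ((a, b) ∈ seen.add p ↔ a ∈ (d.modify p.2 [] (· ++ [p.1])).getD b []) := by
        intro a b
        rw [PySem.Set.mem_add, PySem.Dict.getD_modify]
        by_cases hb : b = p.2
        · subst hb
          rw [if_pos rfl]
          simp only [List.mem_append, List.mem_singleton]
          constructor
          · rintro (h | h)
            · exact Or.inl ((hinv a p.2).1 h)
            · exact Or.inr (congrArg Prod.fst h)
          · rintro (h | h)
            · exact Or.inl ((hinv a p.2).2 h)
            · exact Or.inr (by rw [h])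
        · rw [if_neg hb]
          constructor
          · rintro (h | h)
            · exact (hinv a b).1 h
            · exact absurd (congrArg Prod.snd h) hb
          · intro h; exact Or.inl ((hinv a b).2 h)
      have hres := ih (seen.add p) (d.modify p.2 [] (· ++ [p.1])) hinv' k
      rw [hres]
      simp only [PySem.Dict.getD_modify]
      by_cases hk : k = p.2
      · subst hk
        have hpd : p.1 ∉ d.getD p.2 [] := fun hc => hp ((hinv p.1 p.2).2 hc)
        have hnew : newOf (p :: fs) p.2 (d.getD p.2 [])
            = p.1 :: newOf fs p.2 (d.getD p.2 [] ++ [p.1]) := by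
          simp only [newOf]
          rw [if_pos ⟨trivial, hpd⟩]
        rw [hnew]
        simp [List.append_assoc]
      · simp only [if_neg hk]
        have hnew : newOf (p :: fs) k (d.getD k []) = newOf fs k (d.getD k []) := by
          simp only [newOf]
          rw [if_neg (by rintro ⟨h1, _⟩; exact hk h1.symm)]
        rw [hnew]

-- ---- B's paired (list, set) folds project to ins-folds ----
theorem foldPair : ∀ (l acc : List String) (s : PySem.Set String),
    (∀ x, x ∈ s ↔ x ∈ acc) →
    (l.foldl addNew (acc, s)).1 = l.foldl ins acc ∧
    (∀ x, x ∈ (l.foldl addNew (acc, s)).2 ↔ x ∈ l.foldl ins acc) := by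
  intro l
  induction l with
  | nil => intro acc s h; exact ⟨rfl, h⟩
  | cons k l ih =>
    intro acc s h
    simp only [List.foldl_cons, addNew, ins]
    by_cases hk : k ∈ s
    · rw [if_pos hk, if_pos ((h k).1 hk)]
      exact ih acc s h
    · rw [if_neg hk, if_neg (fun hc => hk ((h k).2 hc))]
      refine ih (acc ++ [k]) (s.add k) ?_
      intro x
      rw [PySem.Set.mem_add]
      simp only [List.mem_append, List.mem_singleton]
      exact or_congr (h x) Iff.rfl

theorem closureB_eq_Mloop (bucket : PySem.Dict String (List String)) (G : String → List String)
    (hbucket : ∀ k, bucket.getD k [] = G k) :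
    ∀ (fuel j : Nat) (ord : List String) (s : PySem.Set String),
    (∀ x, x ∈ s ↔ x ∈ ord) →
    closureLoopB bucket fuel j (ord, s) = Mloop G fuel j ord := by
  intro fuel
  induction fuel with
  | zero => intro j ord s _; rfl
  | succ fuel ih =>
    intro j ord s hinv
    cases hj : ord[j]? with
    | none => simp [closureLoopB, Mloop, hj]
    | some k =>
      simp only [closureLoopB, Mloop, hj]
      obtain ⟨h1, h2⟩ := foldPair (bucket.getD k []) ord s hinv
      have hpair : (bucket.getD k []).foldl addNew (ord, s)
          = ((G k).foldl ins ord, ((bucket.getD k []).foldl addNew (ord, s)).2) := by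
        rw [← hbucket k, ← h1]
      rw [hpair]
      rw [← hbucket k]
      refine ih (j+1) ((bucket.getD k []).foldl ins ord) _ ?_
      intro x
      exact h2 x

-- ---- the simulation: A's interleaved loop equals M's closure + final emission ----
theorem simAM (facts : List (String × String)) :
    ∀ (fA : Nat), ∀ (fB i j : Nat) (ks ord : List String) (R : List (String × String)),
    ord = dedupF ks →
    ord.take j = dedupF (ks.take i) →
    R = (ord.take j).flatMap (groupG (fun k => newOf facts k [])) →
    i ≤ ks.length →
    ks.length + facts.length + 1 ≤ fA + i + R.length →
    ord.length + facts.length + 1 ≤ fB + j + R.length →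
    checkLoopA facts fA i ks R
      = (Mloop (fun k => newOf facts k []) fB j ord).flatMap (groupG (fun k => newOf facts k [])) := by
  intro fA
  induction fA with
  | zero =>
    intro fB i j ks ord R h1 h2 h3 h4 h5 h6
    exfalso
    have hnd : (ord.take j).Nodup := by rw [h2]; exact nodup_foldl_ins _ [] List.nodup_nil
    have hR : R.length ≤ facts.length := by
      rw [h3]; exact lenR_le facts _ hnd
    omega
  | succ fA ih =>
    intro fB i j ks ord R h1 h2 h3 h4 h5 h6
    have hnd : (ord.take j).Nodup := by rw [h2]; exact nodup_foldl_ins _ [] List.nodup_nil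
    have hR : R.length ≤ facts.length := by
      rw [h3]; exact lenR_le facts _ hnd
    cases hki : ks[i]? with
    | none =>
      have hlen : ks.length ≤ i := by
        by_contra hc
        push_neg at hc
        rw [List.getElem?_eq_getElem hc] at hki
        cases hki
      have htk : ks.take i = ks := List.take_of_length_le hlen
      have hordj : ord.take j = ord := by rw [h2, htk, ← h1]
      have hjlen : ord.length ≤ j := by
        by_contra hc
        push_neg at hc
        have hlt := congrArg List.length hordj
        simp only [List.length_take] at hlt
        omega
      have hmj : ord[j]? = none := List.getElem?_eq_none hjlen
      have hM : Mloop (fun k => newOf facts k []) fB j ord = ord := by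
        cases fB with
        | zero => rfl
        | succ fB => simp [Mloop, hmj]
      simp only [checkLoopA, hki]
      rw [hM, h3, hordj]
    | some k =>
      have hilt : i < ks.length := by
        by_contra hc
        push_neg at hc
        rw [List.getElem?_eq_none hc] at hki
        cases hki
      have htksucc : ks.take (i+1) = ks.take i ++ [k] := by
        rw [List.take_succ, hki]
        rfl
      have hdsucc : dedupF (ks.take (i+1)) = ins (dedupF (ks.take i)) k := by
        rw [htksucc, dedupF, List.foldl_append]
        rfl
      set P := ord.take j with hP
      by_cases hdup : k ∈ ks.take i
      · -- duplicate agenda entry: A's scan is a no-op and M does not change state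
        have hkj : k ∈ P := by
          rw [h2]
          exact (mem_foldl_ins _ [] k).2 (Or.inr hdup)
        have hknoop : ∀ p ∈ facts, p.2 = k → p ∈ R := by
          intro p hp hpk
          rw [h3]
          refine List.mem_flatMap.2 ⟨k, hkj, ?_⟩
          have hm : p.1 ∈ newOf facts k [] :=
            mem_newOf facts k [] p.1 (by rw [← hpk, Prod.mk.eta]; exact hp) (by simp)
          simp only [groupG, List.mem_map]
          exact ⟨p.1, hm, by rw [← hpk, Prod.mk.eta]⟩
        simp only [checkLoopA, hki]
        rw [innerA_noop k facts ks R hknoop]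
        refine ih fB (i+1) j ks ord R h1 ?_ h3 (by omega) (by omega) h6
        rw [hdsucc, ins, if_pos (by rw [← h2]; exact hkj)]
        exact h2
      · -- new agenda entry: A emits the whole bucket, M steps
        have hknotR : ∀ a, (a, k) ∈ R ↔ a ∈ ([] : List String) := by
          intro a
          simp only [List.not_mem_nil, iff_false]
          intro hc
          rw [h3] at hc
          obtain ⟨k', hk', hmem⟩ := List.mem_flatMap.1 hc
          simp only [groupG, List.mem_map] at hmem
          obtain ⟨a', _, heq⟩ := hmem
          have hk'k : k' = k := congrArg Prod.snd heq
          subst hk'k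
          rw [h2] at hk'
          have := (mem_foldl_ins _ [] k').1 hk'
          simp only [List.not_mem_nil, false_or] at this
          exact hdup this
        have hGnew := innerA_new k facts ks R [] hknotR
        have hknotd : k ∉ dedupF (ks.take i) := by
          intro hc
          have := (mem_foldl_ins _ [] k).1 hc
          simp only [List.not_mem_nil, false_or] at this
          exact hdup this
        have hdnew : dedupF (ks.take (i+1)) = P ++ [k] := by
          rw [hdsucc, ins, if_neg hknotd, h2]
        have hdnew' : (ks.take (i+1)).foldl ins [] = P ++ [k] := hdnew
        obtain ⟨t, hord⟩ : ∃ t, ord = (P ++ [k]) ++ t := by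
          have hsplit : ord = dedupF (ks.take (i+1) ++ ks.drop (i+1)) := by
            rw [List.take_append_drop]; exact h1
          rw [dedupF, List.foldl_append] at hsplit
          obtain ⟨t, ht⟩ := foldl_ins_delta (ks.drop (i+1)) ((ks.take (i+1)).foldl ins [])
          refine ⟨t, ?_⟩
          rw [hsplit, ht, hdnew']
        have hjle : j ≤ ord.length := by
          by_contra hc
          push_neg at hc
          have hl := congrArg List.length hord
          simp only [List.length_append, hP, List.length_take, List.length_cons] at hl
          omega
        have htakelen : P.length = j := by
          rw [hP]
          simp only [List.length_take]
          omega
        have hordj : ord[j]? = some k := by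
          have hlt : j < (P ++ [k]).length := by
            simp [htakelen]
          rw [hord, List.getElem?_append_left hlt,
            List.getElem?_append_right htakelen.le]
          simp [htakelen]
        cases fB with
        | zero =>
          exfalso
          omega
        | succ fB =>
          simp only [checkLoopA, hki]
          rw [hGnew]
          simp only [Mloop, hordj]
          obtain ⟨t', hord'⟩ := foldl_ins_delta (newOf facts k []) ord
          have hlen1 : (P ++ [k]).length = j + 1 := by
            simp [htakelen]
          refine ih fB (i+1) (j+1) (ks ++ newOf facts k [])
            ((newOf facts k []).foldl ins ord)
            (R ++ (newOf facts k []).map (fun a => (a, k))) ?_ ?_ ?_ ?_ ?_ ?_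
          · rw [dedupF, List.foldl_append, ← dedupF, ← h1]
          · have hks' : (ks ++ newOf facts k []).take (i+1) = ks.take (i+1) :=
              List.take_append_of_le_length (by omega)
            rw [hks', hdnew, hord', hord, List.append_assoc (P ++ [k]) t t',
               List.take_left' hlen1]
          · rw [h3, hord', hord, List.append_assoc (P ++ [k]) t t',
               List.take_left' hlen1, List.flatMap_append]
            simp [groupG]
          · simp only [List.length_append]
            omega
          · simp only [List.length_append, List.length_map]
            omega
          · have hl' : ((newOf facts k []).foldl ins ord).length
                ≤ ord.length + (newOf facts k []).length := length_foldl_ins_le _ _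
            simp only [List.length_append, List.length_map]
            omega

theorem check_alt_eq (knowns : List String) (facts : List (String × String)) :
    check_alt knowns facts
      = (Mloop (fun k => newOf facts k []) (knowns.length + facts.length + 1) 0
          (dedupF knowns)).flatMap (groupG (fun k => newOf facts k [])) := by
  have hbucket : ∀ k, ((buildBucketB facts).2).getD k [] = newOf facts k [] := by
    intro k
    have hempty : ∀ a b : String, ((a, b) ∈ (PySem.Set.empty : PySem.Set (String × String))
        ↔ a ∈ (PySem.Dict.empty : PySem.Dict String (List String)).getD b []) := by
      intro a b
      rw [PySem.Dict.getD_empty]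
      simp [PySem.Set.empty]
    have := bucketB_getD facts PySem.Set.empty PySem.Dict.empty hempty k
    unfold buildBucketB
    rw [this, PySem.Dict.getD_empty]
    rfl
  have hsempty : ∀ x : String, x ∈ (PySem.Set.empty : PySem.Set String) ↔ x ∈ ([] : List String) := by
    intro x; simp [PySem.Set.empty]
  obtain ⟨hs1, hs2⟩ := foldPair knowns [] PySem.Set.empty hsempty
  have hseed : knowns.foldl addNew ([], PySem.Set.empty)
      = (dedupF knowns, (knowns.foldl addNew ([], PySem.Set.empty)).2) := by
    rw [dedupF, ← hs1]
  have hfun : (fun k => (((buildBucketB facts).2).getD k []).map (fun a => (a, k)))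
      = groupG (fun k => newOf facts k []) := by
    funext k
    rw [hbucket k]
    rfl
  show (closureLoopB (buildBucketB facts).2 (knowns.length + facts.length + 1) 0
      (knowns.foldl addNew ([], PySem.Set.empty))).flatMap
      (fun k => (((buildBucketB facts).2).getD k []).map (fun a => (a, k))) = _
  rw [hseed, closureB_eq_Mloop (buildBucketB facts).2 (fun k => newOf facts k []) hbucket _ _ _ _
      (fun x => by rw [hs2 x, dedupF]), hfun]

-- ===== VERDICT (by name: the statement is the Claim_ definition above) =====
theorem check_spec : Claim_equal_check := by
  intro knowns facts _
  unfold Spec_check check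
  rw [check_alt_eq]
  refine simAM facts _ _ 0 0 knowns (dedupF knowns) [] rfl rfl rfl (by omega) (by omega) ?_
  have := length_foldl_ins_le knowns []
  simp only [dedupF, List.length_nil] at this ⊢
  omega
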